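-- pv_equiv track=rewrite | github.com/Dorjderem2002/Olymbits-MCTS | olymbits/olymbits.py | _optimal_hurdle_race
-- ===== SOURCE A (Python) =====
-- def _optimal_hurdle_race(track, pos):
--     res = 0
--     while pos < 30:
--         res += 1
--         if "#" == track[pos + 1 : pos + 2]:
--             pos += 2
--         elif "#" not in track[pos + 1 : pos + 4]:
--             pos += 3
--         elif "#" not in track[pos + 1 : pos + 3]:
--             pos += 2
--         elif "#" not in track[pos + 1 : pos + 2]:
--             pos += 1
--     return res
-- ===== SOURCE B (Python) =====
-- def _optimal_hurdle_race(track, pos):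
--     # Recursive: locate the next hurdle once, map its distance to a step size.
--     if pos >= 30:
--         return 0
--     nxt = track.find('#', pos + 1)
--     d = nxt - pos if nxt != -1 else 99
--     if d == 1:
--         step = 2
--     elif d > 3:
--         step = 3
--     elif d == 2:
--         step = 1
--     else:  # d == 3
--         step = 2
--     return 1 + _optimal_hurdle_race(track, pos + step)
-- ===== Notes on version B (the rewrite author's own statement) =====
-- stated objective: simpler
-- what changed: B replaces A's cascade of four overlapping slice-membership tests per step by a single str.find locate of the next hurdle and a flat distance-to-step mapping, and is written as a recursion instead of a while loop with a counter.
-- outside the precondition, e.g. on _optimal_hurdle_race('#.#', -14): A returns 16, B returns 15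
import Mathlib
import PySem

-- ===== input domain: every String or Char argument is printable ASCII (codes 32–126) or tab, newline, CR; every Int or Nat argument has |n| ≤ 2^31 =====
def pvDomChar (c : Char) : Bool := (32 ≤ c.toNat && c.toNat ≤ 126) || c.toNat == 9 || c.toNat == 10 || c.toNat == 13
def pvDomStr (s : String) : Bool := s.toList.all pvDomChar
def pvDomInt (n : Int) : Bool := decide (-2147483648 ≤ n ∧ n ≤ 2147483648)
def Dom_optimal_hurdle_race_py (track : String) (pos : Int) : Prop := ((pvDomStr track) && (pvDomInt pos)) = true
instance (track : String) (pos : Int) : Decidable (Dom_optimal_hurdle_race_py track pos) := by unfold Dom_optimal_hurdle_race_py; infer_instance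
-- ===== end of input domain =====

-- B replaces A's cascade of four overlapping slice-membership tests by one next-hurdle locate
-- (str.find) plus a flat distance-to-step mapping, written recursively: objective 'simpler'.

-- ===== PORT A =====
-- while pos < 30: res += 1; A's four slice tests in A's order.  The final all-tests-fail arm
-- returns res; it is unreachable (a slice of length ≤ 1 that is not "#" contains no '#').
-- fuel = (30 - pos).toNat bounds the iteration count exactly (pos advances by ≥ 1 per
-- iteration and the loop stops at pos ≥ 30), so this structural recursion is the while loop.
def pvALoop (track : List Char) : Nat → Int → Int → Int
  | 0, _, res => res
  | fuel + 1, pos, res =>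
    if pos < 30 then
      let res := res + 1
      if PySem.List.slice track (some (pos + 1)) (some (pos + 2)) = ['#'] then
        pvALoop track fuel (pos + 2) res
      else if ¬ (PySem.Chars.isIn ['#'] (PySem.List.slice track (some (pos + 1)) (some (pos + 4))) = true) then
        pvALoop track fuel (pos + 3) res
      else if ¬ (PySem.Chars.isIn ['#'] (PySem.List.slice track (some (pos + 1)) (some (pos + 3))) = true) then
        pvALoop track fuel (pos + 2) res
      else if ¬ (PySem.Chars.isIn ['#'] (PySem.List.slice track (some (pos + 1)) (some (pos + 2))) = true) then
        pvALoop track fuel (pos + 1) res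
      else res
    else res

def optimal_hurdle_race_py (track : String) (pos : Int) : Int :=
  pvALoop track.toList (30 - pos).toNat pos 0

-- ===== PORT B =====
-- same exact fuel bound as pvALoop: the recursion steps pos by 1, 2 or 3 each call.
def pvBRace (track : List Char) : Nat → Int → Int
  | 0, _ => 0
  | fuel + 1, pos =>
    if pos < 30 then
      let nxt := PySem.Chars.findFrom track ['#'] (pos + 1)
      let d := if nxt ≠ -1 then nxt - pos else 99
      let step : Int := if d = 1 then 2 else if d > 3 then 3 else if d = 2 then 1 else 2
      1 + pvBRace track fuel (pos + step)
    else 0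

def optimal_hurdle_race_py_alt (track : String) (pos : Int) : Int :=
  pvBRace track.toList (30 - pos).toNat pos

-- ===== PRECONDITION & SPEC =====
-- Pre_ excludes negative pos: there Python resolves A's slice bounds and B's find start by
-- negative-index wraparound, two different accidents of Python string indexing on a position
-- outside the race track's meaningful domain, so neither value is the specified one.
def Pre_optimal_hurdle_race_py (track : String) (pos : Int) : Prop := 0 ≤ pos
instance (track : String) (pos : Int) : Decidable (Pre_optimal_hurdle_race_py track pos) := by
  unfold Pre_optimal_hurdle_race_py; infer_instance

def pvWitness_optimal_hurdle_race_py : String × Int := ("#.#..#....#...#.#..#.....#....#", 0)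

def Spec_optimal_hurdle_race_py (track : String) (pos : Int) (out : Int) : Prop := out = optimal_hurdle_race_py_alt track pos
instance (track : String) (pos : Int) (out : Int) : Decidable (Spec_optimal_hurdle_race_py track pos out) := by unfold Spec_optimal_hurdle_race_py; infer_instance

-- ===== CLAIM (what is proved, stated in full; the proofs are below) =====
def Claim_equal_optimal_hurdle_race_py : Prop := ∀ (track : String) (pos : Int), Dom_optimal_hurdle_race_py track pos → Pre_optimal_hurdle_race_py track pos → Spec_optimal_hurdle_race_py track pos (optimal_hurdle_race_py track pos)

-- ===== LEMMAS AND PROOFS =====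

lemma pv_prefix_singleton (a : Char) (l : List Char) : [a] <+: l ↔ l.head? = some a := by
  cases l with
  | nil => simp
  | cons x xs => simp [List.cons_prefix_cons, eq_comm]

lemma pv_mem_take_iff (l : List Char) (k : Nat) :
    '#' ∈ l.take k ↔ 0 ≤ PySem.Chars.find l ['#'] ∧ PySem.Chars.find l ['#'] < (k : Int) := by
  constructor
  · intro h
    have hf0 : 0 ≤ PySem.Chars.find l ['#'] :=
      (PySem.Chars.find_nonneg_iff l ['#']).2 ((List.singleton_infix_iff _ _).2 (List.mem_of_mem_take h))
    refine ⟨hf0, ?_⟩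
    by_contra hge
    push Not at hge
    obtain ⟨i, hi, hgi⟩ := List.mem_take_iff_getElem.1 h
    apply (PySem.Chars.find_spec hf0).2 i (by omega)
    rw [pv_prefix_singleton, List.head?_drop]
    simp only [List.getElem?_eq_getElem (by omega : i < l.length), hgi]
  · rintro ⟨hf0, hfk⟩
    have h1 := (PySem.Chars.find_spec hf0).1
    rw [pv_prefix_singleton, List.head?_drop] at h1
    obtain ⟨hl, hv⟩ := List.getElem?_eq_some_iff.1 h1
    exact List.mem_take_iff_getElem.2 ⟨(PySem.Chars.find l ['#']).toNat, by omega, hv⟩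

lemma pv_take_one_eq (m : List Char) : (m.take 1 = ['#']) ↔ '#' ∈ m.take 1 := by
  cases m <;> simp [eq_comm]

lemma pv_findFrom_eq (l : List Char) (pos : Int) (hp : 0 ≤ pos) :
    PySem.Chars.findFrom l ['#'] (pos + 1) none =
      if (l.length : Int) < pos + 1 then -1
      else if PySem.Chars.find (l.drop (pos+1).toNat) ['#'] = -1 then -1
      else (pos + 1) + PySem.Chars.find (l.drop (pos+1).toNat) ['#'] := by
  simp only [PySem.Chars.findFrom]
  have h1 : ¬ (pos + 1 < 0) := by omega
  simp [h1, List.take_length]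

lemma pv_loop_eq (l : List Char) :
    ∀ fa fb : Nat, ∀ pos res : Int, (30 - pos).toNat ≤ fa → (30 - pos).toNat ≤ fb → 0 ≤ pos →
      pvALoop l fa pos res = res + pvBRace l fb pos := by
  intro fa
  induction fa with
  | zero =>
    intro fb pos res hfa hfb hp
    have h30 : ¬ pos < 30 := by omega
    cases fb with
    | zero => simp [pvALoop, pvBRace]
    | succ fb => simp [pvALoop, pvBRace, h30]
  | succ n ih =>
    intro fb pos res hfa hfb hp
    by_cases h30 : pos < 30
    · obtain ⟨fb', rfl⟩ : ∃ fb', fb = fb' + 1 := ⟨fb - 1, by omega⟩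
      simp only [pvALoop, pvBRace, if_pos h30]
      have hisin : ∀ m : List Char, (PySem.Chars.isIn ['#'] m = true) ↔ '#' ∈ m :=
        fun m => (PySem.Chars.isIn_iff_infix _ _).trans (List.singleton_infix_iff _ _)
      set j := (pos + 1).toNat with hjdef
      have hj : (j : Int) = pos + 1 := Int.toNat_of_nonneg (by omega)
      have hs1 : PySem.List.slice l (some (pos + 1)) (some (pos + 2)) = (l.drop j).take 1 := by
        rw [PySem.List.slice_toNat l (a := pos+1) (b := pos+2) (by omega) (by omega)]; congr 1; omega
      have hs2 : PySem.List.slice l (some (pos + 1)) (some (pos + 3)) = (l.drop j).take 2 := by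
        rw [PySem.List.slice_toNat l (a := pos+1) (b := pos+3) (by omega) (by omega)]; congr 1; omega
      have hs3 : PySem.List.slice l (some (pos + 1)) (some (pos + 4)) = (l.drop j).take 3 := by
        rw [PySem.List.slice_toNat l (a := pos+1) (b := pos+4) (by omega) (by omega)]; congr 1; omega
      rw [pv_findFrom_eq l pos hp]
      set f := PySem.Chars.find (l.drop j) ['#'] with hfdef
      have hfm1 : -1 ≤ f := PySem.Chars.neg_one_le_find _ _
      by_cases hlen : (l.length : Int) < pos + 1
      · -- past the end: all slices empty, find start past end gives -1
        have hdrop : l.drop j = [] := by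
          apply List.drop_eq_nil_of_le; omega
        rw [hs1, hs2, hs3, hdrop]
        simp only [List.take_nil, if_pos hlen]
        have hA : ¬ (([] : List Char) = ['#']) := by simp
        have hB : PySem.Chars.isIn ['#'] ([] : List Char) = false := by decide
        simp only [hA, if_false, hB]
        norm_num
        rw [ih fb' (pos + 3) (res + 1) (by omega) (by omega) (by omega)]
        ring
      · rw [hs1, hs2, hs3, if_neg hlen]
        by_cases hf : f = -1
        · -- no hurdle ahead at all
          have hnot : '#' ∉ l.drop j := by
            intro hm
            have := (PySem.Chars.find_eq_neg_one_iff (l.drop j) ['#']).1 hf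
            exact this ((List.singleton_infix_iff _ _).2 hm)
          have hA : ¬ ((l.drop j).take 1 = ['#']) := by
            rw [pv_take_one_eq]
            intro hm; exact hnot (List.mem_of_mem_take hm)
          have hB3 : ¬ ('#' ∈ (l.drop j).take 3) := fun hm => hnot (List.mem_of_mem_take hm)
          simp only [hf, if_pos, hA, if_false, hisin, hB3, not_false_iff]
          norm_num
          rw [ih fb' (pos + 3) (res + 1) (by omega) (by omega) (by omega)]
          ring
        · have hf0 : 0 ≤ f := by omega
          have hnxt : ¬ ((pos + 1) + f = -1) := by omega
          simp only [if_neg hf]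
          have hd : pos + 1 + f - pos = f + 1 := by ring
          rw [hd]
          have hm1 : '#' ∈ (l.drop j).take 1 ↔ f < 1 := by
            rw [pv_mem_take_iff]; constructor; · rintro ⟨_, h⟩; exact_mod_cast h
            · intro h; exact ⟨hf0, by exact_mod_cast h⟩
          have hm2 : '#' ∈ (l.drop j).take 2 ↔ f < 2 := by
            rw [pv_mem_take_iff]; constructor; · rintro ⟨_, h⟩; exact_mod_cast h
            · intro h; exact ⟨hf0, by exact_mod_cast h⟩
          have hm3 : '#' ∈ (l.drop j).take 3 ↔ f < 3 := by
            rw [pv_mem_take_iff]; constructor; · rintro ⟨_, h⟩; exact_mod_cast h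
            · intro h; exact ⟨hf0, by exact_mod_cast h⟩
          rcases (by omega : f = 0 ∨ f = 1 ∨ f = 2 ∨ 3 ≤ f) with h0 | h1 | h2 | h3
          · have hA : (l.drop j).take 1 = ['#'] := by
              rw [pv_take_one_eq, hm1]; omega
            simp only [hA, if_true]
            split_ifs <;>
              first
              | omega
              | (rw [ih fb' (pos + 2) (res + 1) (by omega) (by omega) (by omega)]; ring)
          · have hA : ¬ ((l.drop j).take 1 = ['#']) := by
              rw [pv_take_one_eq, hm1]; omega
            have hB3 : '#' ∈ (l.drop j).take 3 := hm3.2 (by omega)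
            have hB2 : '#' ∈ (l.drop j).take 2 := hm2.2 (by omega)
            have hB1 : ¬ '#' ∈ (l.drop j).take 1 := by rw [hm1]; omega
            simp only [hA, if_false, hisin, hB3, hB2, hB1, not_true, not_false_iff, if_true, if_false]
            split_ifs <;>
              first
              | omega
              | (rw [ih fb' (pos + 1) (res + 1) (by omega) (by omega) (by omega)]; ring)
          · have hA : ¬ ((l.drop j).take 1 = ['#']) := by
              rw [pv_take_one_eq, hm1]; omega
            have hB3 : '#' ∈ (l.drop j).take 3 := hm3.2 (by omega)
            have hB2 : ¬ '#' ∈ (l.drop j).take 2 := by rw [hm2]; omega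
            simp only [hA, if_false, hisin, hB3, hB2, not_true, not_false_iff, if_true, if_false]
            split_ifs <;>
              first
              | omega
              | (rw [ih fb' (pos + 2) (res + 1) (by omega) (by omega) (by omega)]; ring)
          · have hA : ¬ ((l.drop j).take 1 = ['#']) := by
              rw [pv_take_one_eq, hm1]; omega
            have hB3 : ¬ '#' ∈ (l.drop j).take 3 := by rw [hm3]; omega
            simp only [hA, if_false, hisin, hB3, not_false_iff, if_true]
            split_ifs <;>
              first
              | omega
              | (rw [ih fb' (pos + 3) (res + 1) (by omega) (by omega) (by omega)]; ring)
    · cases fb with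
      | zero => simp [pvALoop, pvBRace, h30]
      | succ fb => simp [pvALoop, pvBRace, h30]

-- ===== VERDICT (by name: the statement is the Claim_ definition above) =====
theorem optimal_hurdle_race_py_spec : Claim_equal_optimal_hurdle_race_py := by
  intro track pos _hd hp
  unfold Spec_optimal_hurdle_race_py optimal_hurdle_race_py optimal_hurdle_race_py_alt
  simpa using pv_loop_eq track.toList (30 - pos).toNat (30 - pos).toNat pos 0 le_rfl le_rfl hp
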